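-- pv_equiv track=rewrite | github.com/xiafelex/ai-memory-vault | src/ai_memory/storage.py | expand_tags
-- ===== SOURCE A (Python) =====
-- from typing import Iterable, List
--
-- TAG_PRESETS = {
--     "tech": [
--         "technical-rnd",
--         "pipeline-digitalization",
--     ],
--     "management": [
--         "management-innovation",
--         "organization",
--     ],
--     "expression": [
--         "reporting-expression",
--         "writing",
--     ],
--     "thinking": [
--         "learning-thinking",
--         "strategy",
--     ],
-- }
--
-- def expand_tags(tags: Iterable[str], category: str = "") -> List[str]:
--     normalized = []
--     seen = set()
--
--     for tag in tags:
--         clean = tag.strip()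
--         if clean and clean not in seen:
--             normalized.append(clean)
--             seen.add(clean)
--
--     category_key = category.strip().lower()
--     if category_key:
--         preset = TAG_PRESETS.get(category_key, [])
--         if category_key not in seen:
--             normalized.append(category_key)
--             seen.add(category_key)
--         for tag in preset:
--             if tag not in seen:
--                 normalized.append(tag)
--                 seen.add(tag)
--
--     return normalized
-- ===== SOURCE B (Python) =====
-- from typing import Iterable, List
--
-- TAG_PRESETS = {
--     "tech": [
--         "technical-rnd",
--         "pipeline-digitalization",
--     ],
--     "management": [
--         "management-innovation",
--         "organization",
--     ],
--     "expression": [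
--         "reporting-expression",
--         "writing",
--     ],
--     "thinking": [
--         "learning-thinking",
--         "strategy",
--     ],
-- }
--
-- def _dedup(xs: List[str]) -> List[str]:
--     # Filter-dedup: pop the head, erase all its later copies, repeat; no seen set.
--     out: List[str] = []
--     while xs:
--         head, xs = xs[0], xs[1:]
--         if head:
--             out.append(head)
--             xs = [x for x in xs if x != head]
--     return out
--
-- def expand_tags(tags: Iterable[str], category: str = "") -> List[str]:
--     key = category.strip().lower()
--     candidates = [t.strip() for t in tags]
--     if key:
--         candidates.append(key)
--         candidates.extend(TAG_PRESETS.get(key, []))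
--     return _dedup(candidates)
-- ===== Notes on version B (the rewrite author's own statement) =====
-- stated objective: alternative
-- what changed: B builds the full candidate list up front and deduplicates it with a filter-out-the-head worklist loop (pop the head, delete all its later copies, repeat) that uses no seen set, instead of A's two interleaved loops threading a seen set; B trades A's linear seen-set bookkeeping for a set-free quadratic erase pass.
import Mathlib
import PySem

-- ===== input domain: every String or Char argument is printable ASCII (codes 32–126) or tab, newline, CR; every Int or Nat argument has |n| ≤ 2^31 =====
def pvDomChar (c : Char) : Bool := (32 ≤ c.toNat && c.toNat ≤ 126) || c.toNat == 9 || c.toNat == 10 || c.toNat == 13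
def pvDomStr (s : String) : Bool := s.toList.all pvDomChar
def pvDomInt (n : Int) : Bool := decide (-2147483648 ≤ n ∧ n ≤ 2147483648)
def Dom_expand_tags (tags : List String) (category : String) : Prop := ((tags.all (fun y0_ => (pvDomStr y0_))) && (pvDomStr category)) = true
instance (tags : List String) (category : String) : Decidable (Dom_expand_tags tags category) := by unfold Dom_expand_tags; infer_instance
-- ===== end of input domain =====

-- B builds the full candidate list up front and deduplicates it with a recursive
-- filter-out-the-head pass (no seen set), replacing A's two interleaved seen-set loops
-- (objective: alternative decomposition).

-- ===== PORT A =====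
def tagPresets : PySem.Dict String (List String) :=
  PySem.Dict.ofList [("tech", ["technical-rnd", "pipeline-digitalization"]),
    ("management", ["management-innovation", "organization"]),
    ("expression", ["reporting-expression", "writing"]),
    ("thinking", ["learning-thinking", "strategy"])]

def expand_tags (tags : List String) (category : String) : List String :=
  let st := tags.foldl
    (fun (p : List String × PySem.Set String) tag =>
      let clean := PySem.Str.strip tag
      if clean ≠ "" ∧ clean ∉ p.2 then (p.1 ++ [clean], PySem.Set.add p.2 clean) else p)
    ([], PySem.Set.empty)
  let categoryKey := PySem.Str.lower (PySem.Str.strip category)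
  if categoryKey ≠ "" then
    let preset := tagPresets.getD categoryKey []
    let st2 := if categoryKey ∉ st.2 then (st.1 ++ [categoryKey], PySem.Set.add st.2 categoryKey) else st
    (preset.foldl
      (fun (p : List String × PySem.Set String) tag =>
        if tag ∉ p.2 then (p.1 ++ [tag], PySem.Set.add p.2 tag) else p) st2).1
  else st.1

-- ===== PORT B =====
-- filter-dedup loop: pop the head, erase its later copies, repeat (skips empty strings);
-- Source B's while loop with accumulator 'out', as structural recursion on the worklist
def dedupB (out : List String) : List String → List String
  | [] => out
  | x :: xs =>
    if x = "" then dedupB out xs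
    else dedupB (out ++ [x]) (xs.filter (fun y => y ≠ x))
termination_by xs => xs.length
decreasing_by
  · simp
  · have h := List.length_filter_le (fun y : {y // y ∈ xs} => decide (↑y ≠ x)) xs.attach
    simp at h ⊢
    omega

def expand_tags_alt (tags : List String) (category : String) : List String :=
  let key := PySem.Str.lower (PySem.Str.strip category)
  let candidates := tags.map PySem.Str.strip ++
    (if key ≠ "" then key :: tagPresets.getD key [] else [])
  dedupB [] candidates

-- ===== PRECONDITION & SPEC =====
def Spec_expand_tags (tags : List String) (category : String) (out : List String) : Prop := out = expand_tags_alt tags category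
instance (tags : List String) (category : String) (out : List String) : Decidable (Spec_expand_tags tags category out) := by unfold Spec_expand_tags; infer_instance

-- ===== CLAIM =====
def Claim_equal_expand_tags : Prop := ∀ (tags : List String) (category : String), Dom_expand_tags tags category → Spec_expand_tags tags category (expand_tags tags category)

-- ===== LEMMAS AND PROOFS =====
theorem tagPresets_items_eq : tagPresets.items =
    [("tech", ["technical-rnd", "pipeline-digitalization"]),
     ("management", ["management-innovation", "organization"]),
     ("expression", ["reporting-expression", "writing"]),
     ("thinking", ["learning-thinking", "strategy"])] := by decide

theorem tagPresets_getD_ne_empty (k : String) : ∀ t ∈ tagPresets.getD k [], t ≠ "" := by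
  intro t ht
  simp only [PySem.Dict.getD, PySem.Dict.get?, tagPresets_items_eq, List.find?] at ht
  cases h1 : "tech" == k <;> cases h2 : "management" == k <;>
    cases h3 : "expression" == k <;> cases h4 : "thinking" == k <;>
    simp only [h1, h2, h3, h4] at ht <;> simp at ht <;>
    rcases ht with rfl | rfl <;> decide

-- on a list of nonempty strings the full-condition dedup step and A's seen-only step fold alike
theorem foldl_dedup_of_ne_empty (l : List String) :
    ∀ st : List String × PySem.Set String, (∀ t ∈ l, t ≠ "") →
    l.foldl (fun (p : List String × PySem.Set String) c =>
        if c ≠ "" ∧ c ∉ p.2 then (p.1 ++ [c], PySem.Set.add p.2 c) else p) st =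
    l.foldl (fun (p : List String × PySem.Set String) tag =>
        if tag ∉ p.2 then (p.1 ++ [tag], PySem.Set.add p.2 tag) else p) st := by
  induction l with
  | nil => intro st _; rfl
  | cons x xs ih =>
    intro st h
    have hx : x ≠ "" := h x (by simp)
    simp only [List.foldl_cons, hx, ne_eq, not_false_eq_true, true_and]
    exact ih _ (fun t ht => h t (by simp [ht]))

-- the seen-set fold computes acc ++ the recursive filter-dedup of the not-yet-seen elements
theorem foldl_eq_dedupB (l : List String) :
    ∀ (acc : List String) (seen : PySem.Set String),
    (l.foldl (fun (p : List String × PySem.Set String) c =>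
        if c ≠ "" ∧ c ∉ p.2 then (p.1 ++ [c], PySem.Set.add p.2 c) else p) (acc, seen)).1
      = dedupB acc (l.filter (fun x => decide (x ∉ seen))) := by
  induction l with
  | nil => intro acc seen; simp [dedupB]
  | cons x xs ih =>
    intro acc seen
    by_cases hx : x = ""
    · subst hx
      by_cases hs : "" ∈ seen
      · simpa [List.foldl_cons, hs] using ih acc seen
      · simpa [List.foldl_cons, hs, dedupB] using ih acc seen
    · by_cases hs : x ∈ seen
      · simpa [List.foldl_cons, hx, hs] using ih acc seen
      · have step : xs.filter (fun y => decide (y ∉ PySem.Set.add seen x)) =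
            (xs.filter (fun y => decide (y ∉ seen))).filter (fun y => decide (y ≠ x)) := by
          rw [List.filter_filter]
          apply List.filter_congr
          intro a _
          by_cases hax : a = x <;> by_cases has : a ∈ seen <;>
            simp [PySem.Set.mem_add, hax, has]
        simp only [List.foldl_cons, hx, hs, ne_eq, not_false_eq_true, true_and, if_pos]
        rw [ih (acc ++ [x]) (PySem.Set.add seen x), step]
        simp [hx, hs, dedupB]
  
-- ===== VERDICT =====
theorem expand_tags_spec : Claim_equal_expand_tags := by
  intro tags category _
  unfold Spec_expand_tags
  have hA : expand_tags tags category =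
      ((tags.map PySem.Str.strip ++
        (if PySem.Str.lower (PySem.Str.strip category) ≠ "" then
           PySem.Str.lower (PySem.Str.strip category) ::
             tagPresets.getD (PySem.Str.lower (PySem.Str.strip category)) []
         else [])).foldl
        (fun (p : List String × PySem.Set String) c =>
          if c ≠ "" ∧ c ∉ p.2 then (p.1 ++ [c], PySem.Set.add p.2 c) else p)
        ([], PySem.Set.empty)).1 := by
    rw [List.foldl_append, List.foldl_map]
    simp only [expand_tags]
    set st := tags.foldl
      (fun (p : List String × PySem.Set String) tag =>
        let clean := PySem.Str.strip tag
        if clean ≠ "" ∧ clean ∉ p.2 then (p.1 ++ [clean], PySem.Set.add p.2 clean) else p)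
      ([], PySem.Set.empty) with hst
    set key := PySem.Str.lower (PySem.Str.strip category) with hkey
    by_cases hk : key ≠ ""
    · simp only [hk, if_pos, List.foldl_cons, ne_eq, not_false_eq_true, true_and]
      rw [← foldl_dedup_of_ne_empty _ _ (tagPresets_getD_ne_empty key)]
    · simp only [hk, if_false, List.foldl_nil]
  rw [hA, foldl_eq_dedupB]
  simp only [expand_tags_alt]
  have hfilter : ∀ l : List String,
      l.filter (fun x => decide (x ∉ (PySem.Set.empty : PySem.Set String))) = l := by
    intro l; apply List.filter_eq_self.mpr; intro a _; simp [PySem.Set.empty]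
  rw [hfilter]
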